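-- pv_equiv track=rewrite | github.com/MichalisPapa19/Step_Tracker_Device- | Algorithm Step Detection/StepDet_v1.2.py | filter_close_peaks
-- ===== SOURCE A (Python) =====
-- def filter_close_peaks(peak_times, peak_values, min_distance=700):
--     filtered_peaks = []  # Αποθήκευση των φιλτραρισμένων κορυφών
--     i = 0
--
--     while i < len(peak_times):
--         current_peak = (peak_times[i], peak_values[i])
--         j = i + 1
--
--         # Έλεγχος αν υπάρχουν κοντινές κορυφές
--         while j < len(peak_times) and (peak_times[j] - peak_times[i] < min_distance):
--             if peak_values[j] > current_peak[1]:  # Αν η νέα κορυφή είναι μεγαλύτερη, αντικαθιστούμε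
--                 current_peak = (peak_times[j], peak_values[j])
--             j += 1
--
--         filtered_peaks.append(current_peak)  # Αποθήκευση της μεγαλύτερης κορυφής
--         i = j  # Προχωράμε στην επόμενη απομακρυσμένη κορυφή
--
--     return filtered_peaks
-- ===== SOURCE B (Python) =====
-- def filter_close_peaks(peak_times, peak_values, min_distance=700):
--     n = len(peak_times)
--     # pass 1: group boundary indices; a new group starts when the time gap
--     # from the current group's anchor (its first element) reaches min_distance
--     bounds = []
--     for k in range(n):
--         if not bounds or peak_times[k] - peak_times[bounds[-1]] >= min_distance:
--             bounds.append(k)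
--     # pass 2: per-group argmax on value (first occurrence wins ties)
--     out = []
--     for g in range(len(bounds)):
--         start = bounds[g]
--         end = bounds[g + 1] if g + 1 < len(bounds) else n
--         best = max(range(start, end), key=lambda idx: peak_values[idx])
--         out.append((peak_times[best], peak_values[best]))
--     return out
-- ===== Notes on version B (the rewrite author's own statement) =====
-- stated objective: alternative
-- what changed: Replaces A's single nested while-loop (which tracks the running best peak while scanning each window) with two explicit index-driven passes: first a boundary table of group-start indices anchored at each group's first time, then a per-segment argmax via max(range(start,end), key=...).
-- outside the precondition, e.g. on filter_close_peaks([1, 2], [7], 0): A raises IndexError, B raises IndexError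
import Mathlib
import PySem

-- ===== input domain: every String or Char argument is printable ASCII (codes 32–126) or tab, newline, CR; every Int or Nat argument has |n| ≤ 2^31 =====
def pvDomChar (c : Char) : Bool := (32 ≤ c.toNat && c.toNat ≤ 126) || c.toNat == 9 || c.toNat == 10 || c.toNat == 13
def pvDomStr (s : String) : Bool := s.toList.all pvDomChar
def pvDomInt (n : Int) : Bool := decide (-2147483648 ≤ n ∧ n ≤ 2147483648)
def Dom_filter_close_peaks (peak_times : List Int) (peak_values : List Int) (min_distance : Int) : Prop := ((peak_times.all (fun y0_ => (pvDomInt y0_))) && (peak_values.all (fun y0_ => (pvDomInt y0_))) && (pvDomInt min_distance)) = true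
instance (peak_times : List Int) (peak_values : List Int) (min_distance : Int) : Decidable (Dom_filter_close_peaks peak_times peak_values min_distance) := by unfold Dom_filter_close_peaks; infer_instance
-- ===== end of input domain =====

-- B replaces A's nested while-loop by two index passes (boundary table, then per-segment argmax);
-- same cost, different decomposition (objective: alternative).

-- ===== PORT A =====
-- inner while loop of A: scans j while close to the anchor time ti, keeping the best (time, value).
-- fuel = pt.length - j bounds the remaining iterations; when it reaches 0 the loop guard j < len is
-- false as well, so the fuel encoding computes exactly the while loop.
def fcpInnerGo (pt pv : List Int) (md ti : Int) (fuel : Nat) (cur : Int × Int) (j : Nat) :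
    Nat × (Int × Int) :=
  match fuel with
  | 0 => (j, cur)
  | fuel + 1 =>
    if j < pt.length ∧ pt.getD j 0 - ti < md then
      fcpInnerGo pt pv md ti fuel
        (if pv.getD j 0 > cur.2 then (pt.getD j 0, pv.getD j 0) else cur) (j + 1)
    else (j, cur)

def fcpInner (pt pv : List Int) (md ti : Int) (cur : Int × Int) (j : Nat) : Nat × (Int × Int) :=
  fcpInnerGo pt pv md ti (pt.length - j) cur j

-- outer while loop of A (fuel likewise; i advances by at least one per iteration)
def fcpOuterGo (pt pv : List Int) (md : Int) (fuel : Nat) (i : Nat) (acc : List (Int × Int)) :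
    List (Int × Int) :=
  match fuel with
  | 0 => acc
  | fuel + 1 =>
    if i < pt.length then
      let r := fcpInner pt pv md (pt.getD i 0) (pt.getD i 0, pv.getD i 0) (i + 1)
      fcpOuterGo pt pv md fuel r.1 (acc ++ [r.2])
    else acc

def fcpOuter (pt pv : List Int) (md : Int) (i : Nat) (acc : List (Int × Int)) : List (Int × Int) :=
  fcpOuterGo pt pv md (pt.length - i) i acc

def filter_close_peaks (peak_times : List Int) (peak_values : List Int) (min_distance : Int) : List (Int × Int) :=
  fcpOuter peak_times peak_values min_distance 0 []

-- ===== PORT B =====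
-- pass-1 step: append k as a new group start when no group yet or the gap from the last anchor reaches md
def fcpAltStep (pt : List Int) (md : Int) (bs : List Nat) (k : Nat) : List Nat :=
  match bs.getLast? with
  | none => bs ++ [k]
  | some a => if pt.getD k 0 - pt.getD a 0 ≥ md then bs ++ [k] else bs

-- pass-2 body: the (time, value) pair of the argmax index of [s, e) keyed on value
-- (the group range is never empty in B, so the none branch is unreachable)
def fcpAltPick (pt pv : List Int) (s e : Nat) : List (Int × Int) :=
  match PySem.List.max? (List.range' s (e - s)) (fun idx => pv.getD idx 0) with
  | some best => [(pt.getD best 0, pv.getD best 0)]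
  | none => []

def filter_close_peaks_alt (peak_times : List Int) (peak_values : List Int) (min_distance : Int) : List (Int × Int) :=
  let n := peak_times.length
  let bounds := (List.range n).foldl (fcpAltStep peak_times min_distance) []
  (List.range bounds.length).foldl
    (fun out g =>
      out ++ fcpAltPick peak_times peak_values (bounds.getD g 0)
        (if g + 1 < bounds.length then bounds.getD (g + 1) 0 else n)) []

-- ===== PRECONDITION & SPEC =====
-- A indexes peak_values at every position below len(peak_times); it raises IndexError iff
-- peak_values is shorter than peak_times. Pre_ excludes exactly those raising inputs.
def Pre_filter_close_peaks (peak_times : List Int) (peak_values : List Int) (min_distance : Int) : Prop :=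
  peak_times.length ≤ peak_values.length
instance (peak_times : List Int) (peak_values : List Int) (min_distance : Int) : Decidable (Pre_filter_close_peaks peak_times peak_values min_distance) := by unfold Pre_filter_close_peaks; infer_instance

def pvWitness_filter_close_peaks : List Int × List Int × Int := ([0, 100, 800], [5, 9, 3], 700)

def Spec_filter_close_peaks (peak_times : List Int) (peak_values : List Int) (min_distance : Int) (out : List (Int × Int)) : Prop := out = filter_close_peaks_alt peak_times peak_values min_distance
instance (peak_times : List Int) (peak_values : List Int) (min_distance : Int) (out : List (Int × Int)) : Decidable (Spec_filter_close_peaks peak_times peak_values min_distance out) := by unfold Spec_filter_close_peaks; infer_instance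

-- ===== CLAIM (what is proved, stated in full; the proofs are below) =====
def Claim_equal_filter_close_peaks : Prop := ∀ (peak_times : List Int) (peak_values : List Int) (min_distance : Int), Dom_filter_close_peaks peak_times peak_values min_distance → Pre_filter_close_peaks peak_times peak_values min_distance → Spec_filter_close_peaks peak_times peak_values min_distance (filter_close_peaks peak_times peak_values min_distance)

-- ===== LEMMAS AND PROOFS =====

-- the break index of a group anchored at time ti, starting the scan at j
def brkA (pt : List Int) (md ti : Int) (j : Nat) : Nat :=
  if h : j < pt.length ∧ pt.getD j 0 - ti < md then brkA pt md ti (j + 1) else j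
termination_by pt.length - j
decreasing_by omega

-- the update A applies to the running best pair at index k
def fcpUpd (pt pv : List Int) (c : Int × Int) (k : Nat) : Int × Int :=
  if pv.getD k 0 > c.2 then (pt.getD k 0, pv.getD k 0) else c

theorem brkA_pos (pt : List Int) (md ti : Int) (j : Nat)
    (h : j < pt.length ∧ pt.getD j 0 - ti < md) :
    brkA pt md ti j = brkA pt md ti (j + 1) := by
  rw [brkA, dif_pos h]

theorem brkA_neg (pt : List Int) (md ti : Int) (j : Nat)
    (h : ¬ (j < pt.length ∧ pt.getD j 0 - ti < md)) :
    brkA pt md ti j = j := by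
  rw [brkA, dif_neg h]

theorem brkA_ge (pt : List Int) (md ti : Int) (j : Nat) : j ≤ brkA pt md ti j := by
  fun_induction brkA with
  | case1 j h ih => omega
  | case2 j h => omega

theorem brkA_le (pt : List Int) (md ti : Int) (j : Nat) (hj : j ≤ pt.length) :
    brkA pt md ti j ≤ pt.length := by
  fun_induction brkA with
  | case1 j h ih => exact ih (by omega)
  | case2 j h => omega

theorem brkA_mid (pt : List Int) (md ti : Int) (j k : Nat) (h1 : j ≤ k)
    (h2 : k < brkA pt md ti j) : pt.getD k 0 - ti < md := by
  fun_induction brkA pt md ti j with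
  | case1 j h ih =>
    rcases Nat.eq_or_lt_of_le h1 with rfl | hlt
    · exact h.2
    · exact ih (by omega) h2
  | case2 j h => omega

theorem brkA_stop (pt : List Int) (md ti : Int) (j : Nat)
    (h : brkA pt md ti j < pt.length) : ¬ (pt.getD (brkA pt md ti j) 0 - ti < md) := by
  fun_induction brkA pt md ti j with
  | case1 j hc ih => exact ih h
  | case2 j hc => intro hlt; exact hc ⟨h, hlt⟩

theorem fcpInnerGo_succ (pt pv : List Int) (md ti : Int) (fuel : Nat) (cur : Int × Int) (j : Nat) :
    fcpInnerGo pt pv md ti (fuel + 1) cur j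
      = if j < pt.length ∧ pt.getD j 0 - ti < md then
          fcpInnerGo pt pv md ti fuel
            (if pv.getD j 0 > cur.2 then (pt.getD j 0, pv.getD j 0) else cur) (j + 1)
        else (j, cur) := rfl

theorem fcpInnerGo_fst (pt pv : List Int) (md ti : Int) :
    ∀ (fuel : Nat) (cur : Int × Int) (j : Nat), pt.length ≤ j + fuel →
      (fcpInnerGo pt pv md ti fuel cur j).1 = brkA pt md ti j := by
  intro fuel
  induction fuel with
  | zero =>
    intro cur j hf
    rw [brkA_neg pt md ti j (fun hc => absurd hc.1 (by omega))]
    rfl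
  | succ fuel ih =>
    intro cur j hf
    rw [fcpInnerGo_succ]
    by_cases h : j < pt.length ∧ pt.getD j 0 - ti < md
    · rw [if_pos h, ih _ _ (by omega), brkA_pos pt md ti j h]
    · rw [if_neg h, brkA_neg pt md ti j h]

theorem fcpInner_fst (pt pv : List Int) (md ti : Int) (cur : Int × Int) (j : Nat) :
    (fcpInner pt pv md ti cur j).1 = brkA pt md ti j :=
  fcpInnerGo_fst pt pv md ti (pt.length - j) cur j (by omega)

theorem fcpInnerGo_snd (pt pv : List Int) (md ti : Int) :
    ∀ (fuel : Nat) (cur : Int × Int) (j : Nat), pt.length ≤ j + fuel →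
      (fcpInnerGo pt pv md ti fuel cur j).2
        = (List.range' j (brkA pt md ti j - j)).foldl (fcpUpd pt pv) cur := by
  intro fuel
  induction fuel with
  | zero =>
    intro cur j hf
    rw [brkA_neg pt md ti j (fun hc => absurd hc.1 (by omega))]
    simp [fcpInnerGo]
  | succ fuel ih =>
    intro cur j hf
    rw [fcpInnerGo_succ]
    by_cases h : j < pt.length ∧ pt.getD j 0 - ti < md
    · rw [if_pos h]
      have hbb := brkA_pos pt md ti j h
      have hge := brkA_ge pt md ti (j + 1)
      have hlen : brkA pt md ti j - j = (brkA pt md ti (j + 1) - (j + 1)) + 1 := by omega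
      rw [hlen, List.range'_succ, List.foldl_cons, ih _ _ (by omega)]
      rfl
    · rw [if_neg h, brkA_neg pt md ti j h]
      simp

theorem fcpInner_snd (pt pv : List Int) (md ti : Int) (cur : Int × Int) (j : Nat) :
    (fcpInner pt pv md ti cur j).2
      = (List.range' j (brkA pt md ti j - j)).foldl (fcpUpd pt pv) cur :=
  fcpInnerGo_snd pt pv md ti (pt.length - j) cur j (by omega)

theorem fcpOuterGo_succ (pt pv : List Int) (md : Int) (fuel : Nat) (i : Nat) (acc : List (Int × Int)) :
    fcpOuterGo pt pv md (fuel + 1) i acc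
      = if i < pt.length then
          fcpOuterGo pt pv md fuel (fcpInner pt pv md (pt.getD i 0) (pt.getD i 0, pv.getD i 0) (i + 1)).1
            (acc ++ [(fcpInner pt pv md (pt.getD i 0) (pt.getD i 0, pv.getD i 0) (i + 1)).2])
        else acc := rfl

theorem fcpOuterGo_irrel (pt pv : List Int) (md : Int) :
    ∀ (fuel fuel' i : Nat) (acc : List (Int × Int)), pt.length ≤ i + fuel → pt.length ≤ i + fuel' →
      fcpOuterGo pt pv md fuel i acc = fcpOuterGo pt pv md fuel' i acc := by
  intro fuel
  induction fuel with
  | zero =>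
    intro fuel' i acc h1 h2
    cases fuel' with
    | zero => rfl
    | succ f => rw [fcpOuterGo_succ, if_neg (by omega)]; rfl
  | succ fuel ih =>
    intro fuel' i acc h1 h2
    cases fuel' with
    | zero => rw [fcpOuterGo_succ, if_neg (by omega)]; rfl
    | succ f =>
      rw [fcpOuterGo_succ, fcpOuterGo_succ]
      by_cases h : i < pt.length
      · rw [if_pos h, if_pos h]
        have hr : i + 1 ≤ (fcpInner pt pv md (pt.getD i 0) (pt.getD i 0, pv.getD i 0) (i + 1)).1 := by
          rw [fcpInner_fst]
          exact brkA_ge pt md (pt.getD i 0) (i + 1)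
        exact ih f _ _ (by omega) (by omega)
      · rw [if_neg h, if_neg h]

theorem fcpOuter_pos (pt pv : List Int) (md : Int) (i : Nat) (acc : List (Int × Int))
    (h : i < pt.length) :
    fcpOuter pt pv md i acc
      = fcpOuter pt pv md (fcpInner pt pv md (pt.getD i 0) (pt.getD i 0, pv.getD i 0) (i + 1)).1
          (acc ++ [(fcpInner pt pv md (pt.getD i 0) (pt.getD i 0, pv.getD i 0) (i + 1)).2]) := by
  unfold fcpOuter
  rw [show pt.length - i = (pt.length - i - 1) + 1 from by omega, fcpOuterGo_succ, if_pos h]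
  have hr : i + 1 ≤ (fcpInner pt pv md (pt.getD i 0) (pt.getD i 0, pv.getD i 0) (i + 1)).1 := by
    rw [fcpInner_fst]
    exact brkA_ge pt md (pt.getD i 0) (i + 1)
  exact fcpOuterGo_irrel pt pv md _ _ _ _ (by omega) (by omega)

theorem fcpOuter_neg (pt pv : List Int) (md : Int) (i : Nat) (acc : List (Int × Int))
    (h : ¬ i < pt.length) : fcpOuter pt pv md i acc = acc := by
  unfold fcpOuter
  rw [show pt.length - i = 0 from by omega]
  rfl

theorem fcpOuter_acc (pt pv : List Int) (md : Int) (i : Nat) (acc : List (Int × Int)) :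
    fcpOuter pt pv md i acc = acc ++ fcpOuter pt pv md i [] := by
  induction hd : pt.length - i using Nat.strong_induction_on generalizing i acc with
  | _ n IH =>
    by_cases h : i < pt.length
    · rw [fcpOuter_pos pt pv md i acc h, fcpOuter_pos pt pv md i [] h]
      have hge : i + 1 ≤ (fcpInner pt pv md (pt.getD i 0) (pt.getD i 0, pv.getD i 0) (i + 1)).1 := by
        rw [fcpInner_fst]
        exact brkA_ge pt md (pt.getD i 0) (i + 1)
      have hm : pt.length - (fcpInner pt pv md (pt.getD i 0) (pt.getD i 0, pv.getD i 0) (i + 1)).1 < n := by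
        omega
      rw [IH _ hm _ (acc ++ [(fcpInner pt pv md (pt.getD i 0) (pt.getD i 0, pv.getD i 0) (i + 1)).2]) rfl,
          IH _ hm _ ([] ++ [(fcpInner pt pv md (pt.getD i 0) (pt.getD i 0, pv.getD i 0) (i + 1)).2]) rfl]
      simp
    · rw [fcpOuter_neg pt pv md i acc h, fcpOuter_neg pt pv md i [] h]
      simp

-- the list of group-start indices from i on
def anchorsFrom (pt : List Int) (md : Int) (i : Nat) : List Nat :=
  if h : i < pt.length then i :: anchorsFrom pt md (brkA pt md (pt.getD i 0) (i + 1)) else []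
termination_by pt.length - i
decreasing_by have := brkA_ge pt md (pt.getD i 0) (i + 1); omega

theorem anchorsFrom_pos (pt : List Int) (md : Int) (i : Nat) (h : i < pt.length) :
    anchorsFrom pt md i = i :: anchorsFrom pt md (brkA pt md (pt.getD i 0) (i + 1)) := by
  rw [anchorsFrom, dif_pos h]

theorem anchorsFrom_neg (pt : List Int) (md : Int) (i : Nat) (h : ¬ i < pt.length) :
    anchorsFrom pt md i = [] := by
  rw [anchorsFrom, dif_neg h]

-- the pair A keeps for the group anchored at a
def pairOf (pt pv : List Int) (md : Int) (a : Nat) : Int × Int :=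
  (List.range' (a + 1) (brkA pt md (pt.getD a 0) (a + 1) - (a + 1))).foldl
    (fcpUpd pt pv) (pt.getD a 0, pv.getD a 0)

theorem fcpOuter_eq_map (pt pv : List Int) (md : Int) (i : Nat) :
    fcpOuter pt pv md i [] = (anchorsFrom pt md i).map (pairOf pt pv md) := by
  fun_induction anchorsFrom pt md i with
  | case1 i h ih =>
    rw [fcpOuter_pos pt pv md i [] h, fcpOuter_acc, fcpInner_fst, ih, fcpInner_snd]
    simp [pairOf]
  | case2 i h =>
    rw [fcpOuter_neg pt pv md i [] h]
    simp

-- pass 1 of B never appends while the gap from the current anchor stays below md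
theorem foldl_step_const (pt : List Int) (md : Int) (a : Nat) (bs : List Nat)
    (hlast : bs.getLast? = some a) (L : List Nat)
    (hL : ∀ k ∈ L, pt.getD k 0 - pt.getD a 0 < md) :
    L.foldl (fcpAltStep pt md) bs = bs := by
  induction L with
  | nil => rfl
  | cons k t ih =>
    have hv := hL k (by simp)
    have hstep : fcpAltStep pt md bs k = bs := by
      unfold fcpAltStep
      rw [hlast]
      exact if_neg (by omega)
    rw [List.foldl_cons, hstep, ih (fun x hx => hL x (by simp [hx]))]

theorem bounds_suffix (pt : List Int) (md : Int) (a : Nat) (ha : a < pt.length)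
    (bs : List Nat) (hlast : bs.getLast? = some a) :
    (List.range' (a + 1) (pt.length - (a + 1))).foldl (fcpAltStep pt md) bs
      = bs ++ anchorsFrom pt md (brkA pt md (pt.getD a 0) (a + 1)) := by
  induction hd : pt.length - a using Nat.strong_induction_on generalizing a bs with
  | _ n IH =>
    have hge : a + 1 ≤ brkA pt md (pt.getD a 0) (a + 1) := brkA_ge pt md (pt.getD a 0) (a + 1)
    have hle : brkA pt md (pt.getD a 0) (a + 1) ≤ pt.length :=
      brkA_le pt md (pt.getD a 0) (a + 1) (by omega)
    set B := brkA pt md (pt.getD a 0) (a + 1) with hB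
    have h1 : pt.length - (a + 1) = (B - (a + 1)) + (pt.length - B) := by omega
    have h2 : (a + 1) + (B - (a + 1)) = B := by omega
    rw [h1, ← List.range'_append_1, h2, List.foldl_append]
    rw [foldl_step_const pt md a bs hlast (List.range' (a + 1) (B - (a + 1)))
        (by
          intro k hk
          rw [List.mem_range'_1] at hk
          exact brkA_mid pt md (pt.getD a 0) (a + 1) k hk.1 (by rw [← hB]; omega))]
    by_cases hBn : B < pt.length
    · have hcons : List.range' B (pt.length - B) = B :: List.range' (B + 1) (pt.length - (B + 1)) := by
        rw [show pt.length - B = (pt.length - (B + 1)) + 1 from by omega, List.range'_succ]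
      have hstop := brkA_stop pt md (pt.getD a 0) (a + 1) (by rw [← hB]; exact hBn)
      rw [← hB] at hstop
      have hstepB : fcpAltStep pt md bs B = bs ++ [B] := by
        unfold fcpAltStep
        rw [hlast]
        exact if_pos (by omega)
      rw [hcons, List.foldl_cons, hstepB]
      rw [IH (pt.length - B) (by omega) B hBn (bs ++ [B]) (by simp) rfl]
      rw [anchorsFrom_pos pt md B hBn]
      simp
    · have h3 : pt.length - B = 0 := by omega
      rw [h3, anchorsFrom_neg pt md B hBn]
      simp

theorem bounds_eq_anchors (pt : List Int) (md : Int) :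
    (List.range pt.length).foldl (fcpAltStep pt md) [] = anchorsFrom pt md 0 := by
  by_cases h : 0 < pt.length
  · have hsplit : List.range pt.length = 0 :: List.range' (0 + 1) (pt.length - (0 + 1)) := by
      rw [List.range_eq_range', show pt.length = (pt.length - 1) + 1 from by omega,
          List.range'_succ]
      norm_num
    rw [hsplit, List.foldl_cons, show fcpAltStep pt md [] 0 = [0] from rfl,
        bounds_suffix pt md 0 h [0] rfl, anchorsFrom_pos pt md 0 h]
    simp
  · rw [anchorsFrom_neg pt md 0 h]
    simp [show pt.length = 0 from by omega]

-- generic: an append-fold is a flatMap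
theorem foldl_append_flat {β : Type} (F : Nat → List β) (L : List Nat) (init : List β) :
    L.foldl (fun out g => out ++ F g) init = init ++ L.flatMap F := by
  induction L generalizing init with
  | nil => simp
  | cons a t ih => simp [ih, List.flatMap_cons]

-- process adjacent elements of bs (last paired with n)
def adjFlat {β : Type} (F : Nat → Nat → List β) (n : Nat) : List Nat → List β
  | [] => []
  | [a] => F a n
  | a :: b :: t => F a b ++ adjFlat F n (b :: t)

theorem range_flatMap_adj {β : Type} (F : Nat → Nat → List β) (n : Nat) (bs : List Nat) :
    (List.range bs.length).flatMap
        (fun g => F (bs.getD g 0) (if g + 1 < bs.length then bs.getD (g + 1) 0 else n))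
      = adjFlat F n bs := by
  induction bs with
  | nil => simp [adjFlat]
  | cons a t ih =>
    rw [List.length_cons, List.range_succ_eq_map, List.flatMap_cons, List.flatMap_map]
    cases t with
    | nil => simp [adjFlat]
    | cons b t' =>
      have hfun : (fun g => F ((a :: b :: t').getD g.succ 0)
            (if g.succ + 1 < (b :: t').length + 1 then (a :: b :: t').getD (g.succ + 1) 0 else n))
          = (fun g => F ((b :: t').getD g 0)
            (if g + 1 < (b :: t').length then (b :: t').getD (g + 1) 0 else n)) := by
        funext g
        simp only [Nat.succ_eq_add_one, List.getD_cons_succ, List.length_cons]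
        congr 1
        rw [if_congr (by omega : g + 1 + 1 < t'.length + 1 + 1 ↔ g + 1 < t'.length + 1) rfl rfl]
      rw [hfun, ih]
      have hc : 0 + 1 < (b :: t').length + 1 := by simp
      rw [if_pos hc]
      simp [adjFlat]

theorem max?_some_foldl {α κ : Type} [LT κ] [DecidableLT κ] (x : α) (t : List α) (key : α → κ) :
    PySem.List.max? (x :: t) key
      = some (t.foldl (fun m y => if key m < key y then y else m) x) := by
  induction t generalizing x with
  | nil => rfl
  | cons y t' ih =>
    have h1 : PySem.List.max? (x :: y :: t') key
        = PySem.List.max? ((if key x < key y then y else x) :: t') key := by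
      unfold PySem.List.max?
      simp only [List.foldl_cons]
      by_cases h : key x < key y <;> simp [h]
    rw [h1, ih]
    simp [List.foldl_cons]

theorem foldl_upd_index (pt pv : List Int) (L : List Nat) (b : Nat) :
    L.foldl (fcpUpd pt pv) (pt.getD b 0, pv.getD b 0)
      = ((fun b' => (pt.getD b' 0, pv.getD b' 0))
          (L.foldl (fun m k => if pv.getD m 0 < pv.getD k 0 then k else m) b)) := by
  induction L generalizing b with
  | nil => rfl
  | cons k t ih =>
    rw [List.foldl_cons, List.foldl_cons]
    by_cases h : pv.getD b 0 < pv.getD k 0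
    · rw [show fcpUpd pt pv (pt.getD b 0, pv.getD b 0) k = (pt.getD k 0, pv.getD k 0) from by
          unfold fcpUpd; exact if_pos h,
        if_pos h]
      exact ih k
    · rw [show fcpUpd pt pv (pt.getD b 0, pv.getD b 0) k = (pt.getD b 0, pv.getD b 0) from by
          unfold fcpUpd; exact if_neg h,
        if_neg h]
      exact ih b

theorem pick_eq_pairOf (pt pv : List Int) (md : Int) (a : Nat) :
    fcpAltPick pt pv a (brkA pt md (pt.getD a 0) (a + 1)) = [pairOf pt pv md a] := by
  unfold fcpAltPick pairOf
  have hge := brkA_ge pt md (pt.getD a 0) (a + 1)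
  set B := brkA pt md (pt.getD a 0) (a + 1) with hB
  have hBa : B - a = (B - (a + 1)) + 1 := by omega
  rw [hBa, List.range'_succ, max?_some_foldl, foldl_upd_index]

theorem adjFlat_anchors (pt pv : List Int) (md : Int) (i : Nat) :
    adjFlat (fcpAltPick pt pv) pt.length (anchorsFrom pt md i)
      = (anchorsFrom pt md i).map (pairOf pt pv md) := by
  fun_induction anchorsFrom pt md i with
  | case1 i h ih =>
    by_cases hBl : brkA pt md (pt.getD i 0) (i + 1) < pt.length
    · have ih' := ih
      rw [anchorsFrom_pos pt md _ hBl] at ih' ⊢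
      simp only [adjFlat, List.map_cons] at ih' ⊢
      rw [pick_eq_pairOf pt pv md i, ih']
      simp
    · rw [anchorsFrom_neg pt md _ hBl]
      have hle := brkA_le pt md (pt.getD i 0) (i + 1) (by omega)
      have hEq : brkA pt md (pt.getD i 0) (i + 1) = pt.length := by omega
      show fcpAltPick pt pv i pt.length = [pairOf pt pv md i]
      rw [← hEq]
      exact pick_eq_pairOf pt pv md i
  | case2 i h =>
    rfl

-- pass 2 of B, closed over an arbitrary bounds list
theorem altPass2 (pt pv : List Int) (n : Nat) (bs : List Nat) :
    (List.range bs.length).foldl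
        (fun out g =>
          out ++ fcpAltPick pt pv (bs.getD g 0) (if g + 1 < bs.length then bs.getD (g + 1) 0 else n)) []
      = adjFlat (fcpAltPick pt pv) n bs := by
  rw [foldl_append_flat]
  simpa using range_flatMap_adj (fcpAltPick pt pv) n bs

theorem alt_closed (pt pv : List Int) (md : Int) :
    filter_close_peaks_alt pt pv md
      = adjFlat (fcpAltPick pt pv) pt.length ((List.range pt.length).foldl (fcpAltStep pt md) []) :=
  altPass2 pt pv pt.length ((List.range pt.length).foldl (fcpAltStep pt md) [])

-- ===== VERDICT (by name: the statement is the Claim_ definition above) =====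
theorem filter_close_peaks_spec : Claim_equal_filter_close_peaks := by
  unfold Claim_equal_filter_close_peaks
  intro pt pv md _ _
  unfold Spec_filter_close_peaks
  rw [alt_closed, bounds_eq_anchors, adjFlat_anchors]
  show fcpOuter pt pv md 0 [] = _
  rw [fcpOuter_eq_map]
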